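-- pv_equiv track=rewrite | github.com/RobertMLayne/reference-harvester | src/reference_harvester/providers/uspto/provider.py | _host_allowed
-- ===== SOURCE A (Python) =====
-- _ALLOWED_HOSTS = {
--     "data.uspto.gov",
--     "developer.uspto.gov",
--     "api.uspto.gov",
--     "bulkdata.uspto.gov",
--     "developer.data.uspto.gov",
--     "uspto.gov",
-- }
--
-- _ALLOWED_SUFFIXES = {
--     "uspto.gov",
-- }
--
-- def _host_allowed(host: str) -> bool:
--     host = host.lower()
--     if host in _ALLOWED_HOSTS:
--         return True
--     for suffix in _ALLOWED_SUFFIXES: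
--         if host == suffix or host.endswith(f".{suffix}"):
--             return True
--     return False
-- ===== SOURCE B (Python) =====
-- def _host_allowed(host: str) -> bool:
--     host = host.lower()
--     return host == "uspto.gov" or host.endswith(".uspto.gov")
-- ===== Notes on version B (the rewrite author's own statement) =====
-- stated objective: simpler
-- what changed: Dropped the allowlist set lookup and the suffix loop: all six allowlisted hosts are subsumed by the suffix rule, so B is the single closed-form predicate host == 'uspto.gov' or host.endswith('.uspto.gov').
import Mathlib
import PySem

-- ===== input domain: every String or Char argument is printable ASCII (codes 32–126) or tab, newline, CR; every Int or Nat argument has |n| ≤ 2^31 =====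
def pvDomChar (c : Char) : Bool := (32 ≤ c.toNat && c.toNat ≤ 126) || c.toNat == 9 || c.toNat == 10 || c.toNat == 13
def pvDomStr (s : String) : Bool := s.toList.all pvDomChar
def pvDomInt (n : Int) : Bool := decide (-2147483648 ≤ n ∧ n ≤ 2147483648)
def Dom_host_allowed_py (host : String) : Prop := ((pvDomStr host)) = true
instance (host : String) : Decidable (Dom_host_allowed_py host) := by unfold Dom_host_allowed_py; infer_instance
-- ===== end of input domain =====

-- ===== PORT A =====
-- literal transliteration of A: lowercase, set-membership check, then the suffix loop
def pvAllowedHosts : List String :=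
  ["data.uspto.gov", "developer.uspto.gov", "api.uspto.gov",
   "bulkdata.uspto.gov", "developer.data.uspto.gov", "uspto.gov"]

def pvAllowedSuffixes : List String := ["uspto.gov"]

def pvSuffixLoop (host : String) : List String → Bool
  | [] => false
  | suffix :: rest =>
    if host == suffix || PySem.Str.endswith host ("." ++ suffix) then true
    else pvSuffixLoop host rest

def host_allowed_py (host : String) : Bool :=
  let host := PySem.Str.lower host
  if pvAllowedHosts.contains host then true
  else pvSuffixLoop host pvAllowedSuffixes

-- ===== PORT B =====
-- B: the six allowlist entries are subsumed by the suffix rule, so one closed-form predicate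
def host_allowed_py_alt (host : String) : Bool :=
  let host := PySem.Str.lower host
  host == "uspto.gov" || PySem.Str.endswith host ".uspto.gov"

-- ===== PRECONDITION & SPEC =====
def Spec_host_allowed_py (host : String) (out : Bool) : Prop := out = host_allowed_py_alt host
instance (host : String) (out : Bool) : Decidable (Spec_host_allowed_py host out) := by unfold Spec_host_allowed_py; infer_instance

-- ===== CLAIM (what is proved, stated in full; the proofs are below) =====
def Claim_equal_host_allowed_py : Prop := ∀ (host : String), Dom_host_allowed_py host → Spec_host_allowed_py host (host_allowed_py host)

-- ===== LEMMAS AND PROOFS =====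

-- ===== VERDICT (by name: the statement is the Claim_ definition above) =====
-- each allowlisted host already satisfies B's predicate
theorem mem_allowed_imp (h : String) (hm : pvAllowedHosts.contains h = true) :
    (h == "uspto.gov" || PySem.Str.endswith h ".uspto.gov") = true := by
  simp [pvAllowedHosts] at hm
  rcases hm with rfl | rfl | rfl | rfl | rfl | rfl <;> decide

theorem host_allowed_py_spec : Claim_equal_host_allowed_py := by
  intro host _
  unfold Spec_host_allowed_py host_allowed_py host_allowed_py_alt
  set h := PySem.Str.lower host with hh
  by_cases hc : pvAllowedHosts.contains h = true
  · rw [if_pos hc]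
    exact (mem_allowed_imp h hc).symm
  · rw [if_neg hc]
    simp [pvSuffixLoop, pvAllowedSuffixes, beq_eq_decide]
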